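-- pv_equiv track=rewrite | github.com/CodeAndRes/Control-cli | .control/skills/clone_agent_context/logic.py | _pending_and_history
-- ===== SOURCE A (Python) =====
-- def _pending_and_history(inbox_content: str) -> tuple[list[str], list[str]]:
--     pending_marker = "<!-- CONTROL:INBOX:PENDING -->"
--     history_marker = "<!-- CONTROL:INBOX:HISTORY -->"
--     history_header = "## Historial"
--
--     if pending_marker not in inbox_content or history_marker not in inbox_content or history_header not in inbox_content:
--         return [], []
--
--     pending_start = inbox_content.index(pending_marker) + len(pending_marker)
--     history_header_start = inbox_content.index(history_header)
--     history_start = inbox_content.index(history_marker) + len(history_marker)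
--
--     pending_section = inbox_content[pending_start:history_header_start].strip()
--     history_section = inbox_content[history_start:].strip()
--
--     def parse(section: str) -> list[str]:
--         if not section:
--             return []
--         entries = []
--         current = []
--         for line in section.splitlines():
--             if line.startswith("- ["):
--                 if current:
--                     entries.append("\n".join(current))
--                 current = [line]
--             elif current:
--                 current.append(line)
--         if current:
--             entries.append("\n".join(current))
--         return entries
--
--     return parse(pending_section), parse(history_section)
-- ===== SOURCE B (Python) =====
-- def _pending_and_history(inbox_content: str) -> tuple[list[str], list[str]]:
--     pending_marker = "<!-- CONTROL:INBOX:PENDING -->"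
--     history_marker = "<!-- CONTROL:INBOX:HISTORY -->"
--     history_header = "## Historial"
--
--     if pending_marker not in inbox_content or history_marker not in inbox_content or history_header not in inbox_content:
--         return [], []
--
--     pending_start = inbox_content.index(pending_marker) + len(pending_marker)
--     history_header_start = inbox_content.index(history_header)
--     history_start = inbox_content.index(history_marker) + len(history_marker)
--
--     pending_section = inbox_content[pending_start:history_header_start].strip()
--     history_section = inbox_content[history_start:].strip()
--
--     def entries(lines: list[str]) -> list[str]:
--         out = []
--         i, n = 0, len(lines)
--         while i < n:
--             if lines[i].startswith("- ["):
--                 j = i + 1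
--                 while j < n and not lines[j].startswith("- ["):
--                     j += 1
--                 out.append("\n".join(lines[i:j]))
--                 i = j
--             else:
--                 i += 1
--         return out
--
--     return entries(pending_section.splitlines()), entries(history_section.splitlines())
-- ===== Notes on version B (the rewrite author's own statement) =====
-- stated objective: alternative
-- what changed: The stateful accumulator parse loop (entries/current lists mutated per line) is replaced by span-based grouping: scan for a '- [' start line, take the whole block of following continuation lines as one entry, and continue after it.
import Mathlib
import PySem

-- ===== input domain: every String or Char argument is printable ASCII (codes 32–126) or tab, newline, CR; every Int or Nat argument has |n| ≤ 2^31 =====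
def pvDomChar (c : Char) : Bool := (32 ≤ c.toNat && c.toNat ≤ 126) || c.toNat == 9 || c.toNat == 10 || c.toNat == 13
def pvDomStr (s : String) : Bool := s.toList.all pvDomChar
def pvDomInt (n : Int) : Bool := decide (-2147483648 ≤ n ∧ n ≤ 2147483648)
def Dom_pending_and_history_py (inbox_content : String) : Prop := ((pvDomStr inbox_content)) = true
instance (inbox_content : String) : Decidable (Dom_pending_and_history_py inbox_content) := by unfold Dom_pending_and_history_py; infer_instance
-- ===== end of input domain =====

-- B replaces A's stateful accumulator parse loop with an index/span-based grouping
-- (find an entry start, take its continuation block, emit, continue); objective: alternative decomposition, same cost.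


-- ===== PORT A =====
-- one step of A's `for line in section.splitlines()` loop, state = (entries, current)
def pvStepA (st : List String × List String) (line : String) : List String × List String :=
  if PySem.Str.startswith line "- [" then
    ((if st.2 = [] then st.1 else st.1 ++ [PySem.Str.join "\n" st.2]), [line])
  else if st.2 = [] then st
  else (st.1, st.2 ++ [line])

-- A's trailing `if current: entries.append("\n".join(current))`
def pvFinA (st : List String × List String) : List String :=
  if st.2 = [] then st.1 else st.1 ++ [PySem.Str.join "\n" st.2]

-- A's inner `parse`
def pvParseA (sect : String) : List String :=
  if sect = "" then []
  else pvFinA ((PySem.Str.splitlines sect).foldl pvStepA ([], []))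

def pending_and_history_py (inbox_content : String) : List String × List String :=
  let pending_marker := "<!-- CONTROL:INBOX:PENDING -->"
  let history_marker := "<!-- CONTROL:INBOX:HISTORY -->"
  let history_header := "## Historial"
  if ¬ PySem.Str.isIn pending_marker inbox_content ∨
     ¬ PySem.Str.isIn history_marker inbox_content ∨
     ¬ PySem.Str.isIn history_header inbox_content then ([], [])
  else
    let pending_start := PySem.Str.find inbox_content pending_marker + PySem.Str.len pending_marker
    let history_header_start := PySem.Str.find inbox_content history_header
    let history_start := PySem.Str.find inbox_content history_marker + PySem.Str.len history_marker
    let pending_section := PySem.Str.strip (PySem.Str.slice inbox_content (some pending_start) (some history_header_start))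
    let history_section := PySem.Str.strip (PySem.Str.slice inbox_content (some history_start) none)
    (pvParseA pending_section, pvParseA history_section)

-- ===== PORT B =====
-- B's `entries`: span-based grouping — an entry is a "- [" line plus the following non-"- [" lines
def pvEntriesB : List String → List String
  | [] => []
  | l :: rest =>
    if PySem.Str.startswith l "- [" then
      PySem.Str.join "\n" (l :: rest.takeWhile (fun x => !PySem.Str.startswith x "- ["))
        :: pvEntriesB (rest.dropWhile (fun x => !PySem.Str.startswith x "- ["))
    else pvEntriesB rest
termination_by ls => ls.length
decreasing_by
  · have h := List.length_dropWhile_le (fun x => !PySem.Str.startswith x "- [") rest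
    simp at h ⊢; omega
  · simp

def pending_and_history_py_alt (inbox_content : String) : List String × List String :=
  let pending_marker := "<!-- CONTROL:INBOX:PENDING -->"
  let history_marker := "<!-- CONTROL:INBOX:HISTORY -->"
  let history_header := "## Historial"
  if ¬ PySem.Str.isIn pending_marker inbox_content ∨
     ¬ PySem.Str.isIn history_marker inbox_content ∨
     ¬ PySem.Str.isIn history_header inbox_content then ([], [])
  else
    let pending_start := PySem.Str.find inbox_content pending_marker + PySem.Str.len pending_marker
    let history_header_start := PySem.Str.find inbox_content history_header
    let history_start := PySem.Str.find inbox_content history_marker + PySem.Str.len history_marker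
    let pending_section := PySem.Str.strip (PySem.Str.slice inbox_content (some pending_start) (some history_header_start))
    let history_section := PySem.Str.strip (PySem.Str.slice inbox_content (some history_start) none)
    (pvEntriesB (PySem.Str.splitlines pending_section),
     pvEntriesB (PySem.Str.splitlines history_section))

-- ===== PRECONDITION & SPEC =====
def Spec_pending_and_history_py (inbox_content : String) (out : List String × List String) : Prop := out = pending_and_history_py_alt inbox_content
instance (inbox_content : String) (out : List String × List String) : Decidable (Spec_pending_and_history_py inbox_content out) := by unfold Spec_pending_and_history_py; infer_instance

-- ===== CLAIM (what is proved, stated in full; the proofs are below) =====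
def Claim_equal_pending_and_history_py : Prop := ∀ (inbox_content : String), Dom_pending_and_history_py inbox_content → Spec_pending_and_history_py inbox_content (pending_and_history_py inbox_content)

-- ===== LEMMAS AND PROOFS =====

-- A's accumulator loop, finalized, computes B's span-based grouping (generalized over the loop state).
lemma pvFold_eq (ls : List String) : ∀ es cur : List String,
    pvFinA (ls.foldl pvStepA (es, cur)) =
      (if cur = [] then es ++ pvEntriesB ls
       else es ++ [PySem.Str.join "\n" (cur ++ ls.takeWhile (fun x => !PySem.Str.startswith x "- ["))]
              ++ pvEntriesB (ls.dropWhile (fun x => !PySem.Str.startswith x "- ["))) := by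
  induction ls with
  | nil =>
    intro es cur
    by_cases h : cur = [] <;> simp [pvFinA, pvEntriesB, h]
  | cons l t ih =>
    intro es cur
    by_cases hl : PySem.Str.startswith l "- [" = true
    all_goals simp only [PySem.Str.startswith_eq, show ("- [" : String).toList = ['-', ' ', '['] from rfl] at hl
    · have hstep : pvStepA (es, cur) l =
        ((if cur = [] then es else es ++ [PySem.Str.join "\n" cur]), [l]) := by
        simp [pvStepA, hl]
      rw [List.foldl_cons, hstep, ih]
      by_cases h : cur = []
      · simp [h, pvEntriesB, hl]
      · simp [h, pvEntriesB, hl]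
    · by_cases h : cur = []
      · have hstep : pvStepA (es, cur) l = (es, cur) := by
          simp [pvStepA, hl, h]
        rw [List.foldl_cons, hstep, ih]
        simp [h, pvEntriesB, hl]
      · have hstep : pvStepA (es, cur) l = (es, cur ++ [l]) := by
          simp [pvStepA, hl, h]
        rw [List.foldl_cons, hstep, ih]
        simp [h, hl]
  
lemma pvParse_eq (sect : String) :
    pvParseA sect = pvEntriesB (PySem.Str.splitlines sect) := by
  unfold pvParseA
  by_cases h : sect = ""
  · subst h
    rw [if_pos rfl, show PySem.Str.splitlines "" = [] from rfl]
    simp [pvEntriesB]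
  · rw [if_neg h, pvFold_eq _ [] []]; simp

theorem pending_and_history_py_spec' (s : String) :
    pending_and_history_py s = pending_and_history_py_alt s := by
  unfold pending_and_history_py pending_and_history_py_alt
  simp only [pvParse_eq]

-- ===== VERDICT (by name: the statement is the Claim_ definition above) =====
theorem pending_and_history_py_spec : Claim_equal_pending_and_history_py := by
  intro s _
  unfold Spec_pending_and_history_py
  exact pending_and_history_py_spec' s
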